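-- pv_equiv track=rewrite | github.com/halekevi/SlateIQ | NHL/scripts/step9_build_tickets_nhl.py | ticket_diversity
-- ===== SOURCE A (Python) =====
-- MAX_PER_TEAM = 2         # max legs from same team
--
-- def ticket_diversity(legs: list[dict]) -> bool:
--     """Check team/player diversity constraints."""
--     teams = [str(l.get("Team", l.get("team", ""))).upper() for l in legs]
--     players = [str(l.get("Player Name", l.get("player_name", ""))).lower() for l in legs]
--     if len(set(players)) < len(players):
--         return False  # duplicate player
--     for t in set(teams):
--         if teams.count(t) > MAX_PER_TEAM:
--             return False
--     return True
-- ===== SOURCE B (Python) =====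
-- MAX_PER_TEAM = 2         # max legs from same team
--
-- def ticket_diversity(legs: list[dict]) -> bool:
--     """Check team/player diversity constraints (single early-exit pass)."""
--     seen_players = set()
--     team_counts = {}
--     for l in legs:
--         player = str(l.get("Player Name", l.get("player_name", ""))).lower()
--         team = str(l.get("Team", l.get("team", ""))).upper()
--         if player in seen_players:
--             return False
--         seen_players.add(player)
--         c = team_counts.get(team, 0) + 1
--         if c > MAX_PER_TEAM:
--             return False
--         team_counts[team] = c
--     return True
-- ===== Notes on version B (the rewrite author's own statement) =====
-- stated objective: alternative
-- what changed: Replaces the two full list comprehensions plus a per-distinct-team teams.count scan with one early-terminating pass maintaining a seen-players set and incremental team counts.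
import Mathlib
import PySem

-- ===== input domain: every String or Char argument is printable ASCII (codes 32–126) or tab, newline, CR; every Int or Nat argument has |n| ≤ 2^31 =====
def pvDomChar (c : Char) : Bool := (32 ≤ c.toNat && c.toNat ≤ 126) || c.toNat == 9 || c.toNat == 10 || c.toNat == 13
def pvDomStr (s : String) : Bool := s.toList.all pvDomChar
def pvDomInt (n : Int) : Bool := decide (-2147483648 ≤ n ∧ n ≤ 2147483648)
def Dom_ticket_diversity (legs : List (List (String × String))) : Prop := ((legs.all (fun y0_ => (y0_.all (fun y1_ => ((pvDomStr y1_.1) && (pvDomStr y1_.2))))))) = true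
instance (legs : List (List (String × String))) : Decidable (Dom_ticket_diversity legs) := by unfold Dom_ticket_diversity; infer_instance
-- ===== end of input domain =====

-- B fuses A's two comprehensions and per-team count scans into one early-exit pass (objective: alternative).

-- shared key extraction: str(l.get("Team", l.get("team",""))).upper() / the player analogue
def pvTeam (l : List (String × String)) : String :=
  PySem.Str.upper (PySem.Dict.getD (PySem.Dict.mk l) "Team" (PySem.Dict.getD (PySem.Dict.mk l) "team" ""))

def pvPlayer (l : List (String × String)) : String :=
  PySem.Str.lower (PySem.Dict.getD (PySem.Dict.mk l) "Player Name" (PySem.Dict.getD (PySem.Dict.mk l) "player_name" ""))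

-- ===== PORT A =====
def ticket_diversity (legs : List (List (String × String))) : Bool :=
  let teams := legs.map pvTeam
  let players := legs.map pvPlayer
  if (PySem.Set.ofList players).length < players.length then false
  else if (PySem.Set.ofList teams).any (fun t => decide (2 < PySem.List.count teams t)) then false
  else true

-- ===== PORT B =====
def tdGo : List (List (String × String)) → PySem.Set String → PySem.Dict String Int → Bool
  | [], _, _ => true
  | l :: rest, seen, counts =>
    let player := pvPlayer l
    let team := pvTeam l
    if PySem.Set.contains seen player then false
    else
      let c := counts.getD team 0 + 1
      if 2 < c then false
      else tdGo rest (PySem.Set.add seen player) (counts.insert team c)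

def ticket_diversity_alt (legs : List (List (String × String))) : Bool :=
  tdGo legs PySem.Set.empty PySem.Dict.empty

-- ===== PRECONDITION & SPEC =====
def Spec_ticket_diversity (legs : List (List (String × String))) (out : Bool) : Prop := out = ticket_diversity_alt legs
instance (legs : List (List (String × String))) (out : Bool) : Decidable (Spec_ticket_diversity legs out) := by unfold Spec_ticket_diversity; infer_instance

-- ===== CLAIM (what is proved, stated in full; the proofs are below) =====
def Claim_equal_ticket_diversity : Prop := ∀ (legs : List (List (String × String))), Dom_ticket_diversity legs → Spec_ticket_diversity legs (ticket_diversity legs)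

-- ===== LEMMAS AND PROOFS =====

theorem contains_false_iff (s : PySem.Set String) (x : String) :
    PySem.Set.contains s x = false ↔ x ∉ s := by
  rw [← Bool.not_eq_true, PySem.Set.contains_iff]

-- loop invariant for B's single pass
theorem tdGo_iff (legs : List (List (String × String))) :
    ∀ (seen : PySem.Set String) (counts : PySem.Dict String Int),
    (∀ t, 0 ≤ counts.getD t 0) → (∀ t, counts.getD t 0 ≤ 2) →
    (tdGo legs seen counts = true ↔
      (legs.map pvPlayer).Nodup ∧
      (∀ p ∈ legs.map pvPlayer, PySem.Set.contains seen p = false) ∧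
      (∀ t, counts.getD t 0 + ((legs.map pvTeam).count t : Int) ≤ 2)) := by
  induction legs with
  | nil =>
    intro seen counts h0 h2
    refine ⟨fun _ => ⟨List.nodup_nil, ?_, ?_⟩, fun _ => rfl⟩
    · simp
    · intro t; simpa using h2 t
  | cons l rest ih =>
    intro seen counts h0 h2
    simp only [tdGo, List.map_cons]
    by_cases hc : PySem.Set.contains seen (pvPlayer l) = true
    · rw [if_pos hc]
      constructor
      · intro h; exact absurd h (by simp)
      · rintro ⟨_, hp, _⟩
        have := hp (pvPlayer l) (List.mem_cons_self ..)
        rw [hc] at this; exact absurd this (by simp)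
    · rw [if_neg hc]
      have hcf : PySem.Set.contains seen (pvPlayer l) = false := Bool.eq_false_iff.mpr hc
      by_cases hbig : 2 < counts.getD (pvTeam l) 0 + 1
      · rw [if_pos hbig]
        constructor
        · intro h; exact absurd h (by simp)
        · rintro ⟨_, _, h3⟩
          exfalso
          have := h3 (pvTeam l)
          rw [List.count_cons_self] at this
          push_cast at this
          omega
      · rw [if_neg hbig]
        rw [ih (PySem.Set.add seen (pvPlayer l))
            (counts.insert (pvTeam l) (counts.getD (pvTeam l) 0 + 1))
            (fun t => by
              rw [PySem.Dict.getD_insert]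
              split_ifs with ht
              · have := h0 (pvTeam l); omega
              · exact h0 t)
            (fun t => by
              rw [PySem.Dict.getD_insert]
              split_ifs with ht
              · omega
              · exact h2 t)]
        constructor
        · rintro ⟨A1, A2, A3⟩
          refine ⟨List.nodup_cons.mpr ⟨?_, A1⟩, ?_, ?_⟩
          · intro hmem
            have := A2 _ hmem
            rw [contains_false_iff, PySem.Set.mem_add] at this
            exact this (Or.inr rfl)
          · intro p hp
            rcases List.mem_cons.mp hp with rfl | hp'
            · exact hcf
            · have := A2 _ hp'
              rw [contains_false_iff, PySem.Set.mem_add] at this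
              rw [contains_false_iff]
              exact fun h => this (Or.inl h)
          · intro t
            have := A3 t
            rw [PySem.Dict.getD_insert] at this
            by_cases ht : t = pvTeam l
            · subst ht
              rw [if_pos rfl] at this
              rw [List.count_cons_self]
              push_cast at this ⊢
              omega
            · rw [if_neg ht] at this
              simp only [List.count_cons, beq_iff_eq, if_neg (Ne.symm ht), add_zero]
              exact this
        · rintro ⟨B1, B2, B3⟩
          obtain ⟨hnotmem, A1⟩ := List.nodup_cons.mp B1
          refine ⟨A1, ?_, ?_⟩
          · intro p hp
            rw [contains_false_iff, PySem.Set.mem_add]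
            rintro (h | rfl)
            · have := B2 p (List.mem_cons_of_mem _ hp)
              rw [contains_false_iff] at this
              exact this h
            · exact hnotmem hp
          · intro t
            rw [PySem.Dict.getD_insert]
            by_cases ht : t = pvTeam l
            · subst ht
              rw [if_pos rfl]
              have := B3 (pvTeam l)
              rw [List.count_cons_self] at this
              push_cast at this ⊢
              omega
            · rw [if_neg ht]
              have := B3 t
              simp only [List.count_cons, beq_iff_eq, if_neg (Ne.symm ht), add_zero] at this
              exact this

-- characterisation of B
theorem alt_iff (legs : List (List (String × String))) :
    ticket_diversity_alt legs = true ↔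
      (legs.map pvPlayer).Nodup ∧ (∀ t, ((legs.map pvTeam).count t : Int) ≤ 2) := by
  unfold ticket_diversity_alt
  rw [tdGo_iff legs PySem.Set.empty PySem.Dict.empty
      (fun t => by simp [PySem.Dict.getD_empty]) (fun t => by simp [PySem.Dict.getD_empty])]
  constructor
  · rintro ⟨h1, _, h3⟩
    exact ⟨h1, fun t => by have := h3 t; simpa [PySem.Dict.getD_empty] using this⟩
  · rintro ⟨h1, h3⟩
    refine ⟨h1, fun p _ => ?_, fun t => ?_⟩
    · rw [contains_false_iff]; simp [PySem.Set.empty]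
    · simpa [PySem.Dict.getD_empty] using h3 t

-- len(set(xs)) < len(xs) iff xs has a duplicate
theorem ofList_length_lt_iff (xs : List String) :
    (PySem.Set.ofList xs).length < xs.length ↔ ¬ xs.Nodup := by
  constructor
  · intro h hnd
    rw [PySem.Set.ofList_eq_self_of_nodup xs hnd] at h
    omega
  · intro hnd
    have hle : (PySem.Set.ofList xs).length ≤ xs.length := PySem.Set.length_ofList_le xs
    rcases lt_or_eq_of_le hle with h | h
    · exact h
    · exfalso
      apply hnd
      have hperm : List.Perm (PySem.Set.ofList xs) xs.dedup :=
        (List.perm_ext_iff_of_nodup (PySem.Set.nodup_ofList xs) (List.nodup_dedup xs)).mpr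
          (fun a => by rw [PySem.Set.mem_ofList, List.mem_dedup])
      have hlen : xs.dedup.length = xs.length := by
        rw [← hperm.length_eq, h]
      have : xs.dedup = xs := (List.dedup_sublist xs).eq_of_length hlen
      exact List.dedup_eq_self.mp this

-- characterisation of A
theorem a_iff (legs : List (List (String × String))) :
    ticket_diversity legs = true ↔
      (legs.map pvPlayer).Nodup ∧ (∀ t, ((legs.map pvTeam).count t : Int) ≤ 2) := by
  simp only [ticket_diversity]
  by_cases hdup :
      (PySem.Set.ofList (legs.map pvPlayer)).length < (legs.map pvPlayer).length
  · rw [if_pos hdup]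
    constructor
    · intro h; exact absurd h (by simp)
    · rintro ⟨h1, _⟩
      exact absurd h1 ((ofList_length_lt_iff _).mp hdup)
  · rw [if_neg hdup]
    have hnd : (legs.map pvPlayer).Nodup := by
      by_contra hn
      exact hdup ((ofList_length_lt_iff _).mpr hn)
    by_cases hany : (PySem.Set.ofList (legs.map pvTeam)).any
        (fun t => decide (2 < PySem.List.count (legs.map pvTeam) t)) = true
    · rw [if_pos hany]
      constructor
      · intro h; exact absurd h (by simp)
      · rintro ⟨_, h3⟩
        obtain ⟨t, _, ht⟩ := List.any_eq_true.mp hany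
        rw [decide_eq_true_iff] at ht
        have := h3 t
        simp only [PySem.List.count] at ht
        omega
    · rw [if_neg hany]
      simp only [true_iff]
      refine ⟨hnd, fun t => ?_⟩
      by_cases htm : t ∈ legs.map pvTeam
      · have : ¬ (2 < PySem.List.count (legs.map pvTeam) t) := by
          intro hlt
          exact hany (List.any_eq_true.mpr
            ⟨t, (PySem.Set.mem_ofList _ _).mpr htm, decide_eq_true hlt⟩)
        simp only [PySem.List.count] at this
        omega
      · rw [List.count_eq_zero.mpr htm]
        norm_num

-- ===== VERDICT (by name: the statement is the Claim_ definition above) =====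
theorem ticket_diversity_spec : Claim_equal_ticket_diversity := by
  intro legs _
  unfold Spec_ticket_diversity
  rw [Bool.eq_iff_iff, a_iff, alt_iff]
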